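-- pv_equiv track=rewrite | github.com/JinXiejie/shop_location-master | result_for_vote.py | vote_for_result
-- ===== SOURCE A (Python) =====
-- def vote_for_result(x1, x2, x3, x4, x5, x6, x7):
--     arr = [x1, x2, x3, x4, x5, x6, x7]
--     # count the arr[i] happens in the arr by dict method
--     res = {k: arr.count(k) for k in set(arr)}
--     count = 0
--     shop_id = None
--     for (k, v) in res.items():
--         if count < v:
--             shop_id = k
--             count = v
--     if count >= 4:
--         return shop_id
--     else:
--         return x1
-- ===== SOURCE B (Python) =====
-- def vote_for_result(x1, x2, x3, x4, x5, x6, x7):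
--     votes = (x1, x2, x3, x4, x5, x6, x7)
--     # Boyer-Moore majority vote: single scan keeping a candidate and a counter
--     cand = x1
--     cnt = 0
--     for x in votes:
--         if cnt == 0:
--             cand = x
--             cnt = 1
--         elif x == cand:
--             cnt += 1
--         else:
--             cnt -= 1
--     # verify: the candidate wins only with at least 4 of the 7 votes
--     support = 0
--     for x in votes:
--         if x == cand:
--             support += 1
--     return cand if support >= 4 else x1
-- ===== Notes on version B (the rewrite author's own statement) =====
-- stated objective: alternative
-- what changed: Replaces A's set/dict frequency table plus max-count scan by a Boyer-Moore majority vote (candidate+counter pass, then one verification count), returning the candidate only with >=4 of the 7 votes, else x1.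
import Mathlib
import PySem

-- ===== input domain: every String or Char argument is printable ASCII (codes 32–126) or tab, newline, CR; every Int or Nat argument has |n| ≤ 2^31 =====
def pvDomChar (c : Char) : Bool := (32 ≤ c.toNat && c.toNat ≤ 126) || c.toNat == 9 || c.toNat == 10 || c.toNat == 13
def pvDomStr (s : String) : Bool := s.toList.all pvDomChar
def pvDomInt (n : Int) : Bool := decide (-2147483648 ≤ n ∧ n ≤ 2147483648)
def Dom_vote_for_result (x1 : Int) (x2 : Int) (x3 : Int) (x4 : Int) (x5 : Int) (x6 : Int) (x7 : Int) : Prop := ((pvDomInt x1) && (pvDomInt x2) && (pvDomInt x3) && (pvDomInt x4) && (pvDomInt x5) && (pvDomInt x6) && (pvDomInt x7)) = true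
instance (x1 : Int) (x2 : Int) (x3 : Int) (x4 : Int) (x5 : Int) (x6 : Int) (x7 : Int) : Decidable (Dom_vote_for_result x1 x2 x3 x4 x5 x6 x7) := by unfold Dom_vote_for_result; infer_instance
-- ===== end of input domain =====

-- B replaces A's set/dict frequency table and max-count scan by a Boyer-Moore majority vote
-- (candidate+counter pass, then one verification count): alternative algorithm, O(1) extra space.

-- ===== PORT A =====
-- Note: A iterates over set(arr) and then over the dict's items; the RETURNED value does not
-- depend on that iteration order (proved below), so the port uses Set.ofList's first-occurrence
-- order. Python's shop_id starts as None; it is an Option here, and the '.getD x1' in the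
-- count ≥ 4 branch is only for typing — that branch implies shop_id is some value.
def vote_for_result (x1 : Int) (x2 : Int) (x3 : Int) (x4 : Int) (x5 : Int) (x6 : Int) (x7 : Int) : Int :=
  let arr : List Int := [x1, x2, x3, x4, x5, x6, x7]
  -- res = {k: arr.count(k) for k in set(arr)}
  let res : PySem.Dict Int Int :=
    (PySem.Set.ofList arr).foldl (fun d k => d.insert k ((PySem.List.count arr k : Int))) PySem.Dict.empty
  -- for (k, v) in res.items(): if count < v: shop_id = k; count = v
  let fin : Int × Option Int :=
    res.items.foldl (fun (s : Int × Option Int) kv => if s.1 < kv.2 then (kv.2, some kv.1) else s)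
      ((0 : Int), (none : Option Int))
  if 4 ≤ fin.1 then fin.2.getD x1 else x1

-- ===== PORT B =====
def vote_for_result_alt (x1 : Int) (x2 : Int) (x3 : Int) (x4 : Int) (x5 : Int) (x6 : Int) (x7 : Int) : Int :=
  let arr : List Int := [x1, x2, x3, x4, x5, x6, x7]
  -- Boyer-Moore pass: (cand, cnt), cand initialised to x1 with cnt = 0
  let bm : Int × Int :=
    arr.foldl (fun (s : Int × Int) x =>
      if s.2 = 0 then (x, 1) else if x == s.1 then (s.1, s.2 + 1) else (s.1, s.2 - 1)) (x1, 0)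
  -- verification pass
  let support : Int := arr.foldl (fun (n : Int) x => if x == bm.1 then n + 1 else n) 0
  if 4 ≤ support then bm.1 else x1

-- ===== PRECONDITION & SPEC =====
def Spec_vote_for_result (x1 : Int) (x2 : Int) (x3 : Int) (x4 : Int) (x5 : Int) (x6 : Int) (x7 : Int) (out : Int) : Prop := out = vote_for_result_alt x1 x2 x3 x4 x5 x6 x7
instance (x1 : Int) (x2 : Int) (x3 : Int) (x4 : Int) (x5 : Int) (x6 : Int) (x7 : Int) (out : Int) : Decidable (Spec_vote_for_result x1 x2 x3 x4 x5 x6 x7 out) := by unfold Spec_vote_for_result; infer_instance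

-- ===== CLAIM (what is proved, stated in full; the proofs are below) =====
def Claim_equal_vote_for_result : Prop := ∀ (x1 : Int) (x2 : Int) (x3 : Int) (x4 : Int) (x5 : Int) (x6 : Int) (x7 : Int), Dom_vote_for_result x1 x2 x3 x4 x5 x6 x7 → Spec_vote_for_result x1 x2 x3 x4 x5 x6 x7 (vote_for_result x1 x2 x3 x4 x5 x6 x7)

-- ===== LEMMAS AND PROOFS =====

-- counts of two distinct values cannot exceed the length
theorem pv_count_pair_le (l : List Int) (a b : Int) (h : a ≠ b) :
    l.count a + l.count b ≤ l.length := by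
  induction l with
  | nil => simp
  | cons x t ih =>
    simp only [List.count_cons, List.length_cons]
    by_cases hxa : x = a <;> by_cases hxb : x = b <;> simp_all <;> omega

-- the Boyer-Moore candidate is the initial candidate or an element of the list
theorem pv_bm_mem (l : List Int) (c k : Int) :
    (l.foldl (fun (s : Int × Int) x =>
      if s.2 = 0 then (x, 1) else if x == s.1 then (s.1, s.2 + 1) else (s.1, s.2 - 1)) (c, k)).1 = c ∨
    (l.foldl (fun (s : Int × Int) x =>
      if s.2 = 0 then (x, 1) else if x == s.1 then (s.1, s.2 + 1) else (s.1, s.2 - 1)) (c, k)).1 ∈ l := by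
  induction l generalizing c k with
  | nil => simp
  | cons x t ih =>
    simp only [List.foldl_cons]
    split
    · rcases ih x 1 with h | h
      · exact Or.inr (by rw [h]; exact List.mem_cons_self)
      · exact Or.inr (List.mem_cons_of_mem _ h)
    · split
      · rcases ih c (k + 1) with h | h
        · exact Or.inl h
        · exact Or.inr (List.mem_cons_of_mem _ h)
      · rcases ih c (k - 1) with h | h
        · exact Or.inl h
        · exact Or.inr (List.mem_cons_of_mem _ h)

-- Boyer-Moore correctness: a strict majority element is the final candidate
theorem pv_bm_majority (l : List Int) (m : Int) (c k : Int) (hk : 0 ≤ k)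
    (h : (l.length : Int) + k < 2 * ((l.count m : Int) + (if c = m then k else 0))) :
    (l.foldl (fun (s : Int × Int) x =>
      if s.2 = 0 then (x, 1) else if x == s.1 then (s.1, s.2 + 1) else (s.1, s.2 - 1)) (c, k)).1 = m := by
  induction l generalizing c k with
  | nil =>
    simp only [List.foldl_nil]
    by_cases hc : c = m
    · exact hc
    · simp [hc] at h; omega
  | cons x t ih =>
    simp only [List.count_cons, List.length_cons] at h
    push_cast at h
    simp only [List.foldl_cons]
    split
    · -- cnt = 0: candidate becomes x, cnt 1
      rename_i hk0
      apply ih x 1 (by omega)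
      by_cases hxm : x = m <;> by_cases hcm : c = m <;> simp_all
    · split
      · -- x == c: cnt + 1
        rename_i hk0 hxc
        have hxc' : x = c := by simpa using hxc
        apply ih c (k + 1) (by omega)
        by_cases hcm : c = m <;> simp_all <;> omega
      · -- x ≠ c: cnt - 1
        rename_i hk0 hxc
        have hxc' : x ≠ c := by simpa using hxc
        apply ih c (k - 1) (by omega)
        by_cases hcm : c = m <;> by_cases hxm : x = m <;> simp_all <;> omega

-- A's selection fold keeps count ≤ 3 when every value is ≤ 3
theorem pv_afold_le (l : List (Int × Int)) (s : Int × Option Int) (hs : s.1 ≤ 3)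
    (hl : ∀ kv ∈ l, kv.2 ≤ 3) :
    (l.foldl (fun (s : Int × Option Int) kv => if s.1 < kv.2 then (kv.2, some kv.1) else s) s).1 ≤ 3 := by
  induction l generalizing s with
  | nil => simpa
  | cons kv t ih =>
    simp only [List.foldl_cons]
    split
    · exact ih _ (hl kv (by simp)) (fun p hp => hl p (by simp [hp]))
    · exact ih _ hs (fun p hp => hl p (by simp [hp]))

-- A's selection fold never moves off a state of count ≥ 4 when every remaining value is ≤ 3
theorem pv_afold_stay (l : List (Int × Int)) (s : Int × Option Int) (hs : 4 ≤ s.1)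
    (hl : ∀ kv ∈ l, kv.2 ≤ 3) :
    l.foldl (fun (s : Int × Option Int) kv => if s.1 < kv.2 then (kv.2, some kv.1) else s) s = s := by
  induction l generalizing s with
  | nil => rfl
  | cons kv t ih =>
    simp only [List.foldl_cons]
    have h1 : ¬ s.1 < kv.2 := by have := hl kv (by simp); omega
    rw [if_neg h1]
    exact ih s hs (fun p hp => hl p (by simp [hp]))

-- the second B pass counts the candidate
theorem pv_support_eq (l : List Int) (c : Int) :
    l.foldl (fun (n : Int) x => if x == c then n + 1 else n) 0 = (l.count c : Int) := by
  rw [PySem.List.foldl_beq_add_one]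
  simp

theorem vote_for_result_eq_alt (x1 x2 x3 x4 x5 x6 x7 : Int) :
    vote_for_result x1 x2 x3 x4 x5 x6 x7 = vote_for_result_alt x1 x2 x3 x4 x5 x6 x7 := by
  unfold vote_for_result vote_for_result_alt
  set arr : List Int := [x1, x2, x3, x4, x5, x6, x7] with harr
  have hlen : arr.length = 7 := by simp [harr]
  -- the dict's items list
  have hitems :
      ((PySem.Set.ofList arr).foldl (fun d k => d.insert k ((PySem.List.count arr k : Int)))
        PySem.Dict.empty).items
      = (PySem.Set.ofList arr).map (fun k => (k, (PySem.List.count arr k : Int))) := by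
    have := PySem.Dict.items_foldl_insert_fresh (l := PySem.Set.ofList arr)
      (k := fun a => a) (v := fun a => (PySem.List.count arr a : Int)) (d := PySem.Dict.empty)
      (by intro a _; simp [PySem.Dict.contains_empty])
      (by simp [PySem.Set.nodup_ofList arr])
    simpa using this
  simp only [PySem.List.count_eq] at hitems
  simp only [PySem.List.count_eq, pv_support_eq]
  rw [hitems]
  by_cases hmaj : ∃ y ∈ arr, 4 ≤ arr.count y
  · obtain ⟨m, hm, hcm⟩ := hmaj
    -- every other value occurs at most 3 times
    have hother : ∀ y : Int, y ≠ m → arr.count y ≤ 3 := by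
      intro y hy
      have := pv_count_pair_le arr m y (fun h => hy h.symm)
      omega
    -- B side: the candidate is m
    have hcand :
        (arr.foldl (fun (s : Int × Int) x =>
          if s.2 = 0 then (x, 1) else if x == s.1 then (s.1, s.2 + 1) else (s.1, s.2 - 1)) (x1, 0)).1 = m := by
      apply pv_bm_majority arr m x1 0 le_rfl
      simp only [hlen]
      split <;> push_cast <;> omega
    -- A side: the fold over the items ends at (count m, some m)
    have hms : m ∈ PySem.Set.ofList arr := (PySem.Set.mem_ofList arr m).2 hm
    obtain ⟨l1, l2, hsplit⟩ := List.append_of_mem hms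
    have hnd : (PySem.Set.ofList arr).Nodup := PySem.Set.nodup_ofList arr
    rw [hsplit] at hnd
    simp only [List.nodup_append, List.nodup_cons] at hnd
    have hmem1 : ∀ k ∈ l1, k ≠ m := fun k hk he => hnd.2.2 k hk m List.mem_cons_self he
    have hmem2 : ∀ k ∈ l2, k ≠ m := fun k hk he => hnd.2.1.1 (he ▸ hk)
    have hAfold :
        ((PySem.Set.ofList arr).map (fun k => (k, (arr.count k : Int)))).foldl
          (fun (s : Int × Option Int) kv => if s.1 < kv.2 then (kv.2, some kv.1) else s)
          ((0 : Int), (none : Option Int))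
        = ((arr.count m : Int), some m) := by
      rw [hsplit]
      rw [List.map_append, List.map_cons, List.foldl_append, List.foldl_cons]
      have h1 : ((l1.map (fun k => (k, (arr.count k : Int)))).foldl
          (fun (s : Int × Option Int) kv => if s.1 < kv.2 then (kv.2, some kv.1) else s)
          ((0 : Int), (none : Option Int))).1 ≤ 3 := by
        apply pv_afold_le _ _ (by norm_num)
        intro kv hkv
        obtain ⟨k, hk, rfl⟩ := List.mem_map.1 hkv
        have := hother k (hmem1 k hk)
        show ((arr.count k : Int)) ≤ 3
        exact_mod_cast this
      rw [if_pos (by omega)]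
      apply pv_afold_stay
      · show (4 : Int) ≤ (arr.count m : Int)
        exact_mod_cast hcm
      · intro kv hkv
        obtain ⟨k, hk, rfl⟩ := List.mem_map.1 hkv
        have := hother k (hmem2 k hk)
        show ((arr.count k : Int)) ≤ 3
        exact_mod_cast this
    rw [hAfold, hcand]
    have h4 : (4 : Int) ≤ (arr.count m : Int) := by exact_mod_cast hcm
    simp [h4]
  · push Not at hmaj
    have hall : ∀ y ∈ arr, arr.count y ≤ 3 := fun y hy => by
      have := hmaj y hy; omega
    -- A side: final count ≤ 3
    have h1 : (((PySem.Set.ofList arr).map (fun k => (k, (arr.count k : Int)))).foldl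
        (fun (s : Int × Option Int) kv => if s.1 < kv.2 then (kv.2, some kv.1) else s)
        ((0 : Int), (none : Option Int))).1 ≤ 3 := by
      apply pv_afold_le _ _ (by norm_num)
      intro kv hkv
      obtain ⟨k, hk, rfl⟩ := List.mem_map.1 hkv
      have := hall k ((PySem.Set.mem_ofList arr k).1 hk)
      show ((arr.count k : Int)) ≤ 3
      exact_mod_cast this
    rw [if_neg (by omega)]
    -- B side: support of the candidate ≤ 3
    have hx1 : x1 ∈ arr := by simp [harr]
    have hc' : (arr.foldl (fun (s : Int × Int) x =>
        if s.2 = 0 then (x, 1) else if x == s.1 then (s.1, s.2 + 1) else (s.1, s.2 - 1)) (x1, 0)).1 ∈ arr := by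
      rcases pv_bm_mem arr x1 0 with h | h
      · rw [h]; exact hx1
      · exact h
    have hsup := hall _ hc'
    rw [if_neg (by exact_mod_cast by omega)]

-- ===== VERDICT (by name: the statement is the Claim_ definition above) =====
theorem vote_for_result_spec : Claim_equal_vote_for_result := by
  intro x1 x2 x3 x4 x5 x6 x7 _
  exact vote_for_result_eq_alt x1 x2 x3 x4 x5 x6 x7
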